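-- pv_equiv track=rewrite | github.com/desecho/adventofcode | 2018/13-2.py | get_crashed_carts
-- ===== SOURCE A (Python) =====
-- def get_crashed_carts(carts_initial, carts_moved):
--     carts = carts_initial + carts_moved
--     for cart in carts:
--         carts_copy = list(carts)
--         carts_copy.remove(cart)
--         coord = cart[1]
--         coords_copy = [x[1] for x in carts_copy]
--         if coord in coords_copy:
--             crashed_carts = [cart]
--             for c in carts_copy:
--                 if c[1] == coord:
--                     crashed_carts.append(c)
--                     return crashed_carts
-- ===== SOURCE B (Python) =====
-- def get_crashed_carts(carts_initial, carts_moved):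
--     carts = carts_initial + carts_moved
--     counts = {}
--     for cart in carts:
--         counts[cart[1]] = counts.get(cart[1], 0) + 1
--     for i, cart in enumerate(carts):
--         coord = cart[1]
--         if counts[coord] >= 2:
--             partner = next((c for c in carts[i + 1:] if c[1] == coord), None)
--             if partner is not None:
--                 return [cart, partner]
--     return None
-- ===== Notes on version B (the rewrite author's own statement) =====
-- stated objective: faster
-- what changed: A copies the whole cart list, removes the current cart and scans the copy's coordinates for every cart; B builds a coordinate-count dict in one pass and then scans once, looking only past the first duplicated-coordinate cart for its partner.
import Mathlib
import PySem

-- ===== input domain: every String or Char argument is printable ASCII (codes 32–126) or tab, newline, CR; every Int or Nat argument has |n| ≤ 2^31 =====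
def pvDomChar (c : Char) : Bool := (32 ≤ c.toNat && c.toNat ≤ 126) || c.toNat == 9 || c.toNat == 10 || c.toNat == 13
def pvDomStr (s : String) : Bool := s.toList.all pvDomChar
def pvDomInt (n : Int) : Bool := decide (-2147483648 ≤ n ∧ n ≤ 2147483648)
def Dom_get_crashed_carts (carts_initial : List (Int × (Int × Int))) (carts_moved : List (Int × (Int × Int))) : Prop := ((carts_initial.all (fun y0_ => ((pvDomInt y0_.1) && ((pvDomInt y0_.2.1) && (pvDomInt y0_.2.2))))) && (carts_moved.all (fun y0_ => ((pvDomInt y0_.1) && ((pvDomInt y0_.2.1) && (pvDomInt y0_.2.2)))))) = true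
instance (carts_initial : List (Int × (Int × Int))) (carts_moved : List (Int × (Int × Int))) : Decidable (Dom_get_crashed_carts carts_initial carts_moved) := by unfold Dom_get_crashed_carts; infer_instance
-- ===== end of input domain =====

-- B replaces A's per-cart list copy/remove/membership scan (O(n^2)) with a one-pass
-- coordinate-count dict followed by a single indexed scan (O(n)); objective: faster.

-- ===== PORT A =====
-- inner 'for c in carts_copy: if c[1] == coord: crashed_carts.append(c); return crashed_carts'
def pvAInner (cart : Int × (Int × Int)) (coord : Int × Int) : List (Int × (Int × Int)) → Option (List (Int × (Int × Int)))
  | [] => none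
  | c :: rest => if c.2 == coord then some [cart, c] else pvAInner cart coord rest

-- outer 'for cart in carts' loop; carts_copy = carts with the first element equal to cart removed
-- (cart is always a member of carts, so remove? never returns none; getD [] is never taken)
def pvALoop (carts : List (Int × (Int × Int))) : List (Int × (Int × Int)) → Option (List (Int × (Int × Int)))
  | [] => none
  | cart :: rest =>
    let copy := (PySem.List.remove? carts cart).getD []
    if (copy.map (·.2)).contains cart.2 then
      match pvAInner cart cart.2 copy with
      | some r => some r
      | none => pvALoop carts rest
    else pvALoop carts rest

def get_crashed_carts (carts_initial : List (Int × (Int × Int))) (carts_moved : List (Int × (Int × Int))) : Option (List (Int × (Int × Int))) :=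
  let carts := carts_initial ++ carts_moved
  pvALoop carts carts

-- ===== PORT B =====
-- 'counts[cart[1]] = counts.get(cart[1], 0) + 1'
def pvBCounts (carts : List (Int × (Int × Int))) : PySem.Dict (Int × Int) Int :=
  carts.foldl (fun d cart => d.insert cart.2 (d.getD cart.2 0 + 1)) PySem.Dict.empty

-- 'for i, cart in enumerate(carts): …'; counts[coord] is exact as getD because every
-- coordinate of carts was counted in the first pass, so the key is always present.
def pvBLoop (counts : PySem.Dict (Int × Int) Int) (carts : List (Int × (Int × Int))) : List (Int × (Int × (Int × Int))) → Option (List (Int × (Int × Int)))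
  | [] => none
  | (i, cart) :: rest =>
    if counts.getD cart.2 0 ≥ 2 then
      -- 'next((c for c in carts[i+1:] if c[1] == coord), None)'
      match (PySem.List.slice carts (some (i + 1)) none).find? (fun c => c.2 == cart.2) with
      | some p => some [cart, p]
      | none => pvBLoop counts carts rest
    else pvBLoop counts carts rest

def get_crashed_carts_alt (carts_initial : List (Int × (Int × Int))) (carts_moved : List (Int × (Int × Int))) : Option (List (Int × (Int × Int))) :=
  let carts := carts_initial ++ carts_moved
  pvBLoop (pvBCounts carts) carts (PySem.List.enumerate carts 0)

-- ===== PRECONDITION & SPEC =====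
def Spec_get_crashed_carts (carts_initial : List (Int × (Int × Int))) (carts_moved : List (Int × (Int × Int))) (out : Option (List (Int × (Int × Int)))) : Prop := out = get_crashed_carts_alt carts_initial carts_moved
instance (carts_initial : List (Int × (Int × Int))) (carts_moved : List (Int × (Int × Int))) (out : Option (List (Int × (Int × Int)))) : Decidable (Spec_get_crashed_carts carts_initial carts_moved out) := by unfold Spec_get_crashed_carts; infer_instance

-- ===== CLAIM (what is proved, stated in full; the proofs are below) =====
def Claim_equal_get_crashed_carts : Prop := ∀ (carts_initial : List (Int × (Int × Int))) (carts_moved : List (Int × (Int × Int))), Dom_get_crashed_carts carts_initial carts_moved → Spec_get_crashed_carts carts_initial carts_moved (get_crashed_carts carts_initial carts_moved)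

-- ===== LEMMAS AND PROOFS =====

theorem pvAInner_eq_find (cart : Int × (Int × Int)) (coord : Int × Int) (l : List (Int × (Int × Int))) :
    pvAInner cart coord l = (l.find? (fun c => c.2 == coord)).map (fun c => [cart, c]) := by
  induction l with
  | nil => rfl
  | cons c rest ih =>
    simp only [pvAInner, List.find?]
    by_cases h : c.2 = coord
    · simp [h]
    · have hb : (c.2 == coord) = false := by simp [h]
      simp [hb, ih]

theorem pvBCounts_getD (carts : List (Int × (Int × Int))) (v : Int × Int) :
    (pvBCounts carts).getD v 0 = ((carts.map (·.2)).count v : Int) := by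
  have : pvBCounts carts
      = (carts.map (·.2)).foldl (fun d x => d.insert x (d.getD x 0 + 1)) PySem.Dict.empty := by
    simp [pvBCounts, List.foldl_map]
  rw [this, PySem.Dict.getD_foldl_insert_add_one]
  simp [PySem.Dict.empty, PySem.Dict.getD, PySem.Dict.get?]

theorem pv_main (carts pre l : List (Int × (Int × Int))) (hc : carts = pre ++ l)
    (hpre : ∀ x ∈ pre, (carts.map (·.2)).count x.2 = 1) :
    pvALoop carts l = pvBLoop (pvBCounts carts) carts (PySem.List.enumerate l (pre.length : Int)) := by
  induction l generalizing pre with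
  | nil => simp [pvALoop, pvBLoop, PySem.List.enumerate]
  | cons cart rest ih =>
    have hcartnotpre : cart ∉ pre := by
      intro hmem
      have h1 := hpre cart hmem
      have : 2 ≤ (carts.map (·.2)).count cart.2 := by
        subst hc
        rcases List.append_of_mem hmem with ⟨p1, p2, rfl⟩
        simp [List.count_append]
        omega
      omega
    have hcopy : (PySem.List.remove? carts cart).getD [] = pre ++ rest := by
      have hmem : cart ∈ carts := by subst hc; simp
      rw [PySem.List.remove?_eq_some_erase _ _ hmem]
      subst hc
      rw [List.erase_append_right _ hcartnotpre]
      simp [List.erase_cons_head]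
    have hprecoord : (pre.map (·.2)).count cart.2 = 0 := by
      rw [List.count_eq_zero]
      intro hmem
      rcases List.mem_map.mp hmem with ⟨x, hx, hx2⟩
      have h1 := hpre x hx
      have : 2 ≤ (carts.map (·.2)).count x.2 := by
        subst hc
        rcases List.append_of_mem hx with ⟨p1, p2, rfl⟩
        simp [List.count_append, hx2]
        omega
      omega
    have hcnt : (carts.map (·.2)).count cart.2
        = 1 + (rest.map (·.2)).count cart.2 := by
      subst hc
      simp [List.count_append, hprecoord]
      omega
    have henum : PySem.List.enumerate (cart :: rest) (pre.length : Int)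
        = ((pre.length : Int), cart) :: PySem.List.enumerate rest ((pre.length : Int) + 1) := by
      simp [PySem.List.enumerate_cons]
    have hslice : PySem.List.slice carts (some ((pre.length : Int) + 1)) none = rest := by
      have : ((pre.length : Int) + 1) = (((pre.length + 1 : Nat)) : Int) := by push_cast; ring
      rw [this, PySem.List.slice_from_natCast]
      subst hc
      rw [show pre ++ cart :: rest = (pre ++ [cart]) ++ rest by simp]
      exact List.drop_left' (by simp)
    rw [henum]
    simp only [pvALoop, pvBLoop, hcopy, hslice, pvBCounts_getD, pvAInner_eq_find]
    by_cases hcond : 2 ≤ (rest.map (·.2)).count cart.2 + 1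
    · -- duplicated coordinate: both branches fire
      have hA : ((pre ++ rest).map (·.2)).contains cart.2 = true := by
        have : 1 ≤ (rest.map (·.2)).count cart.2 := by omega
        have hm : cart.2 ∈ rest.map (·.2) := List.count_pos_iff.mp (by omega)
        simp [List.mem_append]
        exact Or.inr (by simpa using hm)
      have hfind : (pre ++ rest).find? (fun c => c.2 == cart.2)
          = rest.find? (fun c => c.2 == cart.2) := by
        rw [List.find?_append]
        have : pre.find? (fun c => c.2 == cart.2) = none := by
          rw [List.find?_eq_none]
          intro x hx hbeq
          have : x.2 ∈ pre.map (·.2) := List.mem_map.mpr ⟨x, hx, rfl⟩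
          have := List.count_pos_iff.mpr this
          have hxe : x.2 = cart.2 := by simpa using hbeq
          rw [hxe] at this
          omega
        simp [this]
      have hsome : (rest.find? (fun c => c.2 == cart.2)).isSome := by
        have hm : cart.2 ∈ rest.map (·.2) := List.count_pos_iff.mp (by omega)
        rcases List.mem_map.mp hm with ⟨c, hc', hce⟩
        exact List.find?_isSome.mpr ⟨c, hc', by simp [hce]⟩
      rcases Option.isSome_iff_exists.mp hsome with ⟨p, hp⟩
      rw [hA, hfind, hp]
      simp [hcnt]
      intro h0
      exact absurd h0 (by omega)
    · -- unique coordinate: both recurse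
      have hrest0 : (rest.map (·.2)).count cart.2 = 0 := by omega
      have hA : ((pre ++ rest).map (·.2)).contains cart.2 = false := by
        have hnm : cart.2 ∉ (pre ++ rest).map (·.2) := by
          rw [List.map_append]
          intro hy
          rcases List.mem_append.mp hy with h | h
          · have := List.count_pos_iff.mpr h; omega
          · have := List.count_pos_iff.mpr h; omega
        simpa using hnm
      have hB : ¬ ((2:Int) ≤ (((carts.map (·.2)).count cart.2 : Nat) : Int)) := by
        rw [hcnt, hrest0]
        norm_num
      rw [hA]
      simp only [if_neg hB, if_false, Bool.false_eq_true]
      have := ih (pre ++ [cart]) (by simp [hc])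
        (by
          intro x hx
          rcases List.mem_append.mp hx with h | h
          · exact hpre x h
          · simp at h
            subst h
            omega)
      simpa using this

-- ===== VERDICT (by name: the statement is the Claim_ definition above) =====
theorem get_crashed_carts_spec : Claim_equal_get_crashed_carts := by
  intro ci cm _
  unfold Spec_get_crashed_carts get_crashed_carts get_crashed_carts_alt
  exact pv_main (ci ++ cm) [] (ci ++ cm) (by simp) (by simp)
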